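-- pv_equiv track=rewrite | github.com/abdal-hussein/Programming-at-SeattleU | CPSC 3400 Languages & Computation/HW2 - Python Time Processor/hw2.py | get_latest_time
-- ===== SOURCE A (Python) =====
-- def get_latest_time(time_list):
--     """ Retrieves the latest time in the time list
--
--     :param time_list: a list of time tuples
--     :return: the latest time in the list
--     """
--     # Get only PM times
--     latest_times = [time for time in time_list if time[2] == 'PM']
--     if not latest_times:
--         # Check for AM times later than 12:00 AM
--         latest_times = [time for time in time_list if time[0] != 12]
--         if not latest_times:
--             latest_times = time_list
--     else:
--         # Check for PM times later than 12:00 PM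
--         later_than_12 = False
--         for time in latest_times:
--             if time[0] != 12:
--                 later_than_12 = True
--                 break
--         if later_than_12:
--             latest_times = [time for time in latest_times if time[0] != 12]
--
--     return max(latest_times)
-- ===== SOURCE B (Python) =====
-- def get_latest_time(time_list):
--     """Latest time: single max over the list with a priority key.
--
--     Priority groups reproduce the original's filtering order:
--     PM with hour != 12 beats PM at 12, which beats any non-PM with
--     hour != 12, which beats non-PM at 12; ties break by the tuple itself.
--     """
--     def priority(t):
--         if t[2] == 'PM':
--             return 2 if t[0] == 12 else 3
--         return 0 if t[0] == 12 else 1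
--     return max(time_list, key=lambda t: (priority(t), t))
-- ===== Notes on version B (the rewrite author's own statement) =====
-- stated objective: simpler
-- what changed: Replaces the three conditional filtering passes plus a break-loop with a single max over the whole list using a 4-level priority key (PM/non-PM crossed with hour==12) and the tuple itself as tiebreak.
import Mathlib
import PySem

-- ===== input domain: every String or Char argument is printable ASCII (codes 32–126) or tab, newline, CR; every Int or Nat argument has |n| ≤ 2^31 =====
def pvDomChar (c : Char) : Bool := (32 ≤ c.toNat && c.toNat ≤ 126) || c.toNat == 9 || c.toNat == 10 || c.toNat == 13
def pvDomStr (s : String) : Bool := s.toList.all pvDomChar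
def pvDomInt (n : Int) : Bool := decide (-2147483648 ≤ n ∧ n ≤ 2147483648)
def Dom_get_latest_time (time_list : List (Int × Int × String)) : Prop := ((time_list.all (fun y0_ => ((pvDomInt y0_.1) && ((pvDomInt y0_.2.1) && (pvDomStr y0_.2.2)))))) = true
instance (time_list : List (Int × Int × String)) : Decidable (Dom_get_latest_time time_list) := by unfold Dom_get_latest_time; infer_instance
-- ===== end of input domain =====

-- B replaces A's three conditional filtering passes and break-loop by a single max with a
-- 4-level priority key; same O(n) cost, simpler (objective: simpler, not faster).

-- ===== PORT A =====
-- Python tuple comparison a < b on (int, int, str), strings compared code-point-lexicographically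
def pvTupLt (a b : Int × Int × String) : Bool :=
  decide (a.1 < b.1) ||
    (a.1 == b.1 && (decide (a.2.1 < b.2.1) ||
      (a.2.1 == b.2.1 && decide (a.2.2.toList < b.2.2.toList))))

-- max(l :: ls): Python's running max (updates when the next element is strictly greater)
def pvRunMaxS (a : Int × Int × String) (t : List (Int × Int × String)) : Int × Int × String :=
  t.foldl (fun acc x => if pvTupLt acc x then x else acc) a

-- the list A's filtering passes leave in latest_times
def pvLatest (time_list : List (Int × Int × String)) : List (Int × Int × String) :=
  let latest0 := time_list.filter (fun t => t.2.2 == "PM")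
  if latest0 = [] then
    let am := time_list.filter (fun t => !(t.1 == 12))
    if am = [] then time_list else am
  else
    -- the for/break loop setting later_than_12
    let later_than_12 := latest0.any (fun t => !(t.1 == 12))
    if later_than_12 then latest0.filter (fun t => !(t.1 == 12)) else latest0

def get_latest_time (time_list : List (Int × Int × String)) : Int × Int × String :=
  match pvLatest time_list with
  | [] => (0, 0, "")   -- unreachable under Pre_ (Python: max([]) raises ValueError)
  | l :: ls => pvRunMaxS l ls

-- ===== PORT B =====
def pvPrio (t : Int × Int × String) : Int :=
  if t.2.2 == "PM" then (if t.1 == 12 then 2 else 3) else (if t.1 == 12 then 0 else 1)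

-- comparison of the keys (priority(t), t): Python tuple comparison, lexicographic
def pvKeyLt (a b : Int × Int × String) : Bool :=
  decide (pvPrio a < pvPrio b) || (pvPrio a == pvPrio b && pvTupLt a b)

def pvRunMaxK (a : Int × Int × String) (t : List (Int × Int × String)) : Int × Int × String :=
  t.foldl (fun acc x => if pvKeyLt acc x then x else acc) a

def get_latest_time_alt (time_list : List (Int × Int × String)) : Int × Int × String :=
  match time_list with
  | [] => (0, 0, "")   -- unreachable under Pre_ (Python: max([]) raises ValueError)
  | h :: t => pvRunMaxK h t

-- ===== PRECONDITION & SPEC =====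
-- Pre_ excludes only the empty list, where Python's max raises ValueError in both A and B.
def Pre_get_latest_time (time_list : List (Int × Int × String)) : Prop := time_list ≠ []
instance (time_list : List (Int × Int × String)) : Decidable (Pre_get_latest_time time_list) := by unfold Pre_get_latest_time; infer_instance
def pvWitness_get_latest_time : (List (Int × Int × String)) := [(11, 30, "AM"), (12, 0, "PM")]

def Spec_get_latest_time (time_list : List (Int × Int × String)) (out : Int × Int × String) : Prop := out = get_latest_time_alt time_list
instance (time_list : List (Int × Int × String)) (out : Int × Int × String) : Decidable (Spec_get_latest_time time_list out) := by unfold Spec_get_latest_time; infer_instance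

-- ===== CLAIM (what is proved, stated in full; the proofs are below) =====
def Claim_equal_get_latest_time : Prop := ∀ (time_list : List (Int × Int × String)), Dom_get_latest_time time_list → Pre_get_latest_time time_list → Spec_get_latest_time time_list (get_latest_time time_list)

-- ===== LEMMAS AND PROOFS =====

-- strict-order views of the two comparisons: embeddings into lexicographic products
def pvES (t : Int × Int × String) : Int ×ₗ (Int ×ₗ List Char) :=
  toLex (t.1, toLex (t.2.1, t.2.2.toList))

def pvEK (t : Int × Int × String) : Int ×ₗ (Int ×ₗ (Int ×ₗ List Char)) :=
  toLex (pvPrio t, pvES t)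

lemma pvES_inj : Function.Injective pvES := by
  intro a b h
  have h' := congrArg ofLex h
  simp only [pvES, ofLex_toLex] at h'
  obtain ⟨h1, h2⟩ := Prod.ext_iff.mp h'
  have h2' := congrArg ofLex h2
  simp only [ofLex_toLex] at h2'
  obtain ⟨h3, h4⟩ := Prod.ext_iff.mp h2'
  exact Prod.ext h1 (Prod.ext h3 (String.toList_inj.mp h4))

lemma pvTupLt_eq (a b : Int × Int × String) : pvTupLt a b = decide (pvES a < pvES b) := by
  simp only [pvTupLt, pvES, Prod.Lex.toLex_lt_toLex]
  by_cases h1 : a.1 < b.1 <;> by_cases h2 : a.1 = b.1 <;>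
    by_cases h3 : a.2.1 < b.2.1 <;> by_cases h4 : a.2.1 = b.2.1 <;>
    simp [h1, h2, h3, h4]

lemma pvKeyLt_eq (a b : Int × Int × String) : pvKeyLt a b = decide (pvEK a < pvEK b) := by
  simp only [pvKeyLt, pvEK, Prod.Lex.toLex_lt_toLex, pvTupLt_eq]
  by_cases h1 : pvPrio a < pvPrio b <;> by_cases h2 : pvPrio a = pvPrio b <;> simp [h1, h2]

-- the running-max loop returns an element of the list whose key is maximal
lemma foldMax_spec {κ : Type} [LinearOrder κ] (f : (Int × Int × String) → κ) :
    ∀ (t : List (Int × Int × String)) (a : Int × Int × String),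
      (t.foldl (fun acc x => if f acc < f x then x else acc) a) ∈ a :: t ∧
        ∀ y ∈ a :: t, ¬ f (t.foldl (fun acc x => if f acc < f x then x else acc) a) < f y := by
  intro t
  induction t with
  | nil =>
    intro a
    refine ⟨by simp, ?_⟩
    intro y hy
    simp only [List.foldl_nil, List.mem_singleton] at hy ⊢
    subst hy; exact lt_irrefl _
  | cons x ts ih =>
    intro a
    simp only [List.foldl_cons]
    by_cases hax : f a < f x
    · rw [if_pos hax]
      obtain ⟨hmem, hmax⟩ := ih x
      refine ⟨?_, ?_⟩
      · rcases List.mem_cons.mp hmem with h | h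
        · simp [h]
        · simp [h]
      · intro y hy
        rcases List.mem_cons.mp hy with rfl | hy'
        · intro hcon; exact hmax x (by simp) (lt_trans hcon hax)
        · exact hmax y hy'
    · rw [if_neg hax]
      obtain ⟨hmem, hmax⟩ := ih a
      refine ⟨?_, ?_⟩
      · rcases List.mem_cons.mp hmem with h | h
        · simp [h]
        · simp [h]
      · intro y hy
        rcases List.mem_cons.mp hy with rfl | hy'
        · exact hmax y (by simp)
        · rcases List.mem_cons.mp hy' with rfl | hy''
          · intro hcon; exact hmax a (by simp) (lt_of_lt_of_le hcon (not_lt.mp hax))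
          · exact hmax y (by simp [hy''])

lemma pvRunMaxS_eq (a : Int × Int × String) (t : List (Int × Int × String)) :
    pvRunMaxS a t = t.foldl (fun acc x => if pvES acc < pvES x then x else acc) a := by
  unfold pvRunMaxS
  congr 1
  funext acc x
  rw [pvTupLt_eq]
  by_cases h : pvES acc < pvES x <;> simp [h]

lemma pvRunMaxK_eq (a : Int × Int × String) (t : List (Int × Int × String)) :
    pvRunMaxK a t = t.foldl (fun acc x => if pvEK acc < pvEK x then x else acc) a := by
  unfold pvRunMaxK
  congr 1
  funext acc x
  rw [pvKeyLt_eq]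
  by_cases h : pvEK acc < pvEK x <;> simp [h]

-- the priority written with propositional tests
lemma pvPrio_eq (x : Int × Int × String) :
    pvPrio x = (if x.2.2 = "PM" then (if x.1 = 12 then 2 else 3)
                else (if x.1 = 12 then 0 else 1)) := by
  simp only [pvPrio, beq_iff_eq]

-- the common core: if A's surviving list l :: ls consists exactly of the priority-P elements
-- of the input, then max(l :: ls) equals max(input, key=(priority, id))
lemma branch_eq (h : Int × Int × String) (t : List (Int × Int × String))
    (l : Int × Int × String) (ls : List (Int × Int × String)) (P : Int)
    (hsub : ∀ x ∈ l :: ls, x ∈ h :: t)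
    (hP : ∀ x ∈ l :: ls, pvPrio x = P)
    (hmax : ∀ x ∈ h :: t, pvPrio x ≤ P)
    (hback : ∀ x ∈ h :: t, pvPrio x = P → x ∈ l :: ls) :
    pvRunMaxS l ls = pvRunMaxK h t := by
  rw [pvRunMaxS_eq, pvRunMaxK_eq]
  obtain ⟨hAmem, hAmax⟩ := foldMax_spec pvES ls l
  obtain ⟨hBmem, hBmax⟩ := foldMax_spec pvEK t h
  set A := ls.foldl (fun acc x => if pvES acc < pvES x then x else acc) l with hA
  set B := t.foldl (fun acc x => if pvEK acc < pvEK x then x else acc) h with hB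
  have hBl := hBmax l (hsub l (by simp))
  have hPl : pvPrio l = P := hP l (by simp)
  have hgeB : P ≤ pvPrio B := by
    by_contra hcon
    rw [not_le] at hcon
    exact hBl (by
      simp only [pvEK, Prod.Lex.toLex_lt_toLex]
      exact Or.inl (hPl ▸ hcon))
  have hPB : pvPrio B = P := le_antisymm (hmax B hBmem) hgeB
  have hBinL : B ∈ l :: ls := hback B hBmem hPB
  have h1 : ¬ pvES A < pvES B := hAmax B hBinL
  have h2 : ¬ pvES B < pvES A := by
    have hkey := hBmax A (hsub A hAmem)
    have hPA : pvPrio A = P := hP A hAmem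
    intro hcon
    exact hkey (by
      simp only [pvEK, Prod.Lex.toLex_lt_toLex]
      exact Or.inr ⟨by rw [hPA, hPB], hcon⟩)
  exact pvES_inj (le_antisymm (not_lt.mp h2) (not_lt.mp h1))

-- ===== VERDICT (by name: the statement is the Claim_ definition above) =====
theorem get_latest_time_spec : Claim_equal_get_latest_time := by
  intro tl _hdom hpre
  unfold Spec_get_latest_time
  obtain ⟨h, t, rfl⟩ : ∃ h t, tl = h :: t := by
    cases tl with
    | nil => exact absurd rfl hpre
    | cons h t => exact ⟨h, t, rfl⟩
  show get_latest_time (h :: t) = pvRunMaxK h t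
  unfold get_latest_time pvLatest
  simp only []
  set pm := (h :: t).filter (fun x => x.2.2 == "PM") with hpm
  have hpmMem : ∀ x, x ∈ pm ↔ (x ∈ h :: t ∧ x.2.2 = "PM") := by
    intro x; rw [hpm, List.mem_filter]; simp
  by_cases h1 : pm = []
  · rw [if_pos h1]
    have hnoPM : ∀ x ∈ h :: t, ¬ x.2.2 = "PM" := by
      intro x hx hPMx
      have : x ∈ pm := (hpmMem x).mpr ⟨hx, hPMx⟩
      simp [h1] at this
    set am := (h :: t).filter (fun x => !(x.1 == 12)) with ham
    have hamMem : ∀ x, x ∈ am ↔ (x ∈ h :: t ∧ ¬ x.1 = 12) := by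
      intro x; rw [ham, List.mem_filter]; simp
    by_cases h2 : am = []
    · -- case 4: all non-PM, hour 12 everywhere: latest_times = time_list, P = 0
      rw [if_pos h2]
      have h12 : ∀ x ∈ h :: t, x.1 = 12 := by
        intro x hx
        by_contra hne
        have : x ∈ am := (hamMem x).mpr ⟨hx, hne⟩
        simp [h2] at this
      exact branch_eq h t h t 0 (fun x hx => hx)
        (fun x hx => by rw [pvPrio_eq, if_neg (hnoPM x hx), if_pos (h12 x hx)])
        (fun x hx => by rw [pvPrio_eq, if_neg (hnoPM x hx), if_pos (h12 x hx)])
        (fun x hx _ => hx)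
    · -- case 3: no PM, some hour ≠ 12: latest_times = am, P = 1
      rw [if_neg h2]
      obtain ⟨l, ls, hL⟩ := List.exists_cons_of_ne_nil h2
      rw [hL]
      have hmem : ∀ x, x ∈ l :: ls ↔ (x ∈ h :: t ∧ ¬ x.1 = 12) := by
        intro x; rw [← hL]; exact hamMem x
      refine branch_eq h t l ls 1 (fun x hx => ((hmem x).mp hx).1)
        (fun x hx => ?_) (fun x hx => ?_) (fun x hx hPx => ?_)
      · obtain ⟨hin, hne⟩ := (hmem x).mp hx
        rw [pvPrio_eq, if_neg (hnoPM x hin), if_neg hne]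
      · rw [pvPrio_eq, if_neg (hnoPM x hx)]; split_ifs <;> norm_num
      · refine (hmem x).mpr ⟨hx, ?_⟩
        rw [pvPrio_eq, if_neg (hnoPM x hx)] at hPx
        intro h12x
        rw [if_pos h12x] at hPx
        omega
  · rw [if_neg h1]
    by_cases h3 : pm.any (fun x => !(x.1 == 12))
    · -- case 1: some PM with hour ≠ 12: latest_times = pm.filter (hour ≠ 12), P = 3
      rw [if_pos h3]
      obtain ⟨w, hw, hw12⟩ := List.any_eq_true.mp h3
      have hwf : w ∈ pm.filter (fun x => !(x.1 == 12)) :=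
        List.mem_filter.mpr ⟨hw, hw12⟩
      obtain ⟨l, ls, hL⟩ := List.exists_cons_of_ne_nil (List.ne_nil_of_mem hwf)
      rw [hL]
      have hmem : ∀ x, x ∈ l :: ls ↔ (x ∈ h :: t ∧ x.2.2 = "PM" ∧ ¬ x.1 = 12) := by
        intro x
        rw [← hL, List.mem_filter]
        constructor
        · rintro ⟨hxpm, hxb⟩
          obtain ⟨hin, hPMx⟩ := (hpmMem x).mp hxpm
          exact ⟨hin, hPMx, by simpa using hxb⟩
        · rintro ⟨hin, hPMx, hne⟩
          exact ⟨(hpmMem x).mpr ⟨hin, hPMx⟩, by simpa using hne⟩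
      refine branch_eq h t l ls 3 (fun x hx => ((hmem x).mp hx).1)
        (fun x hx => ?_)
        (fun x _ => by rw [pvPrio_eq]; split_ifs <;> norm_num)
        (fun x hx hPx => ?_)
      · obtain ⟨_, hPMx, hne⟩ := (hmem x).mp hx
        rw [pvPrio_eq, if_pos hPMx, if_neg hne]
      · rw [pvPrio_eq] at hPx
        refine (hmem x).mpr ⟨hx, ?_, ?_⟩ <;> by_contra hc <;>
          simp only [hc, if_pos] at hPx <;> split_ifs at hPx <;> omega
    · -- case 2: PM present, every PM at hour 12: latest_times = pm, P = 2
      rw [if_neg h3]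
      obtain ⟨l, ls, hL⟩ := List.exists_cons_of_ne_nil h1
      rw [hL]
      have hall : ∀ x ∈ pm, x.1 = 12 := by
        intro x hx
        by_contra hne
        exact h3 (List.any_eq_true.mpr ⟨x, hx, by simpa using hne⟩)
      have hmem : ∀ x, x ∈ l :: ls ↔ (x ∈ h :: t ∧ x.2.2 = "PM") := by
        intro x; rw [← hL]; exact hpmMem x
      refine branch_eq h t l ls 2 (fun x hx => ((hmem x).mp hx).1)
        (fun x hx => ?_) (fun x hx => ?_) (fun x hx hPx => ?_)
      · obtain ⟨hin, hPMx⟩ := (hmem x).mp hx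
        have h12x : x.1 = 12 := hall x (hL ▸ hx)
        rw [pvPrio_eq, if_pos hPMx, if_pos h12x]
      · by_cases hPMx : x.2.2 = "PM"
        · have hxpm : x ∈ pm := (hpmMem x).mpr ⟨hx, hPMx⟩
          rw [pvPrio_eq, if_pos hPMx, if_pos (hall x hxpm)]
        · rw [pvPrio_eq, if_neg hPMx]; split_ifs <;> norm_num
      · by_cases hPMx : x.2.2 = "PM"
        · exact (hmem x).mpr ⟨hx, hPMx⟩
        · rw [pvPrio_eq, if_neg hPMx] at hPx
          split_ifs at hPx <;> omega
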